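-- pv_equiv track=rewrite | github.com/izabelamaria24/FMI | python/Hw5/file2.py | search_occ
-- ===== SOURCE A (Python) =====
-- def search_occ(list, value, type):
--     l = 0
--     r = len(list) - 1
--     res = -1
--     while l <= r:
--         m = (l + r) // 2
--         if value > list[m]:
--             l = m + 1
--         elif value < list[m]:
--             r = m - 1
--         else:
--             res = m
--             if type == 0: # first occ
--                 r = m - 1
--             else:
--                 l = m + 1 # last occ
--
--     return res
-- ===== SOURCE B (Python) =====
-- def search_occ(list, value, type):
--     # single recursive helper carrying the best hit seen so far as Optional[int];
--     # the step computes a boolean 'right' that merges A's four branches into one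
--     # tail call with selected arguments
--     def go(l, r, best):
--         if l > r:
--             return -1 if best is None else best
--         m = (l + r) // 2
--         x = list[m]
--         hit = (x == value)
--         right = x < value or (hit and type != 0)
--         return go(m + 1 if right else l, r if right else m - 1, m if hit else best)
--     return go(0, len(list) - 1, None)
-- ===== Notes on version B (the rewrite author's own statement) =====
-- stated objective: alternative
-- what changed: Replaces the four-way branching while loop with an Int res sentinel by a tail-recursive helper that threads the best hit as an Optional value and merges the branches into one boolean direction selector and a single recursive call.
import Mathlib
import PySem

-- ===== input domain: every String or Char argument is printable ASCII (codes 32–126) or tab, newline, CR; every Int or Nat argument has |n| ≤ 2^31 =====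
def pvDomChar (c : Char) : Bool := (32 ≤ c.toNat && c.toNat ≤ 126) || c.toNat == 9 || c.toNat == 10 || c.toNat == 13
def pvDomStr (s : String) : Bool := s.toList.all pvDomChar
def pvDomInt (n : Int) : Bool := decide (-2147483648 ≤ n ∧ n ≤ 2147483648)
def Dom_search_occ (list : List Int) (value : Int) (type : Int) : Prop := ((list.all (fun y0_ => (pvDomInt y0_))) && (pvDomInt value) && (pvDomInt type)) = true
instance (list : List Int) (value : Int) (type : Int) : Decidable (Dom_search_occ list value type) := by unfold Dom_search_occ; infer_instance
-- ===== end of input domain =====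

-- B replaces A's four-way branching while loop (with an Int res sentinel) by a
-- tail-recursive helper threading an Option best-hit and a boolean direction
-- selector; same midpoints, same value (alternative decomposition).


-- ===== PORT A =====
-- A's while loop over state (l, r, res). The Nat fuel only makes the same
-- computation total (both ports get the same fuel and the correspondence
-- lemma below holds at EVERY fuel); list[m] is ported as pyGetD … 0, exact
-- here because the loop keeps 0 ≤ l ≤ m ≤ r ≤ len - 1, so the index is
-- always in range (Python never raises).
def search_occ_loop (list : List Int) (value : Int) (type : Int) :
    Nat → Int → Int → Int → Int
  | 0, _, _, res => res
  | fuel + 1, l, r, res =>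
    if l ≤ r then
      if value > PySem.List.pyGetD list (PySem.Int.floordiv (l + r) 2) 0 then
        search_occ_loop list value type fuel (PySem.Int.floordiv (l + r) 2 + 1) r res
      else if value < PySem.List.pyGetD list (PySem.Int.floordiv (l + r) 2) 0 then
        search_occ_loop list value type fuel l (PySem.Int.floordiv (l + r) 2 - 1) res
      else if type = 0 then
        search_occ_loop list value type fuel l (PySem.Int.floordiv (l + r) 2 - 1) (PySem.Int.floordiv (l + r) 2)
      else
        search_occ_loop list value type fuel (PySem.Int.floordiv (l + r) 2 + 1) r (PySem.Int.floordiv (l + r) 2)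
    else res

def search_occ (list : List Int) (value : Int) (type : Int) : Int :=
  search_occ_loop list value type (list.length + 1) 0 (list.length - 1) (-1)

-- ===== PORT B =====
-- Source B's go(l, r, best): Optional best hit, boolean direction selector, one
-- recursive call with selected arguments; the same Nat fuel makes it total.
def search_occ_go (list : List Int) (value : Int) (type : Int) :
    Nat → Int → Int → Option Int → Int
  | 0, _, _, best => best.getD (-1)
  | fuel + 1, l, r, best =>
    if l > r then best.getD (-1)
    else
      let m := PySem.Int.floordiv (l + r) 2
      let x := PySem.List.pyGetD list m 0
      let hit := decide (x = value)
      let right := decide (x < value) || (hit && decide (type ≠ 0))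
      search_occ_go list value type fuel
        (if right then m + 1 else l) (if right then r else m - 1)
        (if hit then some m else best)

def search_occ_alt (list : List Int) (value : Int) (type : Int) : Int :=
  search_occ_go list value type (list.length + 1) 0 (list.length - 1) none

-- ===== PRECONDITION & SPEC =====
def Spec_search_occ (list : List Int) (value : Int) (type : Int) (out : Int) : Prop := out = search_occ_alt list value type
instance (list : List Int) (value : Int) (type : Int) (out : Int) : Decidable (Spec_search_occ list value type out) := by unfold Spec_search_occ; infer_instance

-- ===== CLAIM (what is proved, stated in full; the proofs are below) =====
def Claim_equal_search_occ : Prop := ∀ (list : List Int) (value : Int) (type : Int), Dom_search_occ list value type → Spec_search_occ list value type (search_occ list value type)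

-- ===== LEMMAS AND PROOFS =====

-- Loop ↔ recursion correspondence at every fuel: A's res accumulator is B's
-- Option best encoded with -1 as "none" (0 ≤ l keeps every recorded midpoint
-- nonnegative, so the encoding never collides with a real hit).
theorem search_occ_loop_eq_go (list : List Int) (value : Int) (type : Int) :
    ∀ (n : Nat) (l r res : Int), 0 ≤ l →
      search_occ_go list value type n l r (if res = -1 then none else some res) =
        search_occ_loop list value type n l r res := by
  intro n
  induction n with
  | zero =>
    intro l r res hl
    by_cases hres : res = -1 <;> simp [search_occ_loop, search_occ_go, hres]
  | succ n ih =>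
    intro l r res hl
    by_cases hlr : l ≤ r
    · have hb := PySem.Int.floordiv_two_mid_bounds (lo := l) (hi := r) hlr
      rw [search_occ_loop, search_occ_go, if_pos hlr, if_neg (by omega)]
      simp only
      generalize hmg : PySem.Int.floordiv (l + r) 2 = m at hb ⊢
      generalize hxg : PySem.List.pyGetD list m 0 = x
      by_cases h1 : value > x
      · rw [if_pos h1,
          show (decide (x < value) || (decide (x = value) && decide (type ≠ 0))) = true by
            simp; omega,
          show decide (x = value) = false by simp; omega]
        simp only [Bool.false_eq_true, if_false]
        exact ih (m + 1) r res (by omega)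
      · rw [if_neg h1]
        by_cases h2 : value < x
        · rw [if_pos h2,
            show (decide (x < value) || (decide (x = value) && decide (type ≠ 0))) = false by
              simp; omega,
            show decide (x = value) = false by simp; omega]
          simp only [Bool.false_eq_true, if_false]
          exact ih l (m - 1) res hl
        · have hxv : x = value := by omega
          rw [if_neg h2, show decide (x = value) = true by simp [hxv],
            show decide (x < value) = false by simp; omega]
          simp only [Bool.false_or, Bool.true_and]
          by_cases h3 : type = 0
          · rw [if_pos h3, show decide (type ≠ 0) = false by simp [h3]]
            simp only [Bool.false_eq_true, if_false]
            have := ih l (m - 1) m hl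
            rwa [if_neg (by omega)] at this
          · rw [if_neg h3, show decide (type ≠ 0) = true by simp [h3]]
            simp only
            have := ih (m + 1) r m (by omega)
            rwa [if_neg (by omega)] at this
    · rw [search_occ_loop, search_occ_go, if_neg hlr, if_pos (by omega)]
      by_cases hres : res = -1 <;> simp [hres]

-- ===== VERDICT (by name: the statement is the Claim_ definition above) =====
theorem search_occ_spec : Claim_equal_search_occ := by
  intro list value type _
  unfold Spec_search_occ search_occ search_occ_alt
  have := search_occ_loop_eq_go list value type (list.length + 1) 0 (list.length - 1) (-1) (by omega)
  rw [if_pos rfl] at this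
  exact this.symm
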